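-- pv_equiv track=rewrite | github.com/pratikangolkar217-boop/DMS-CCA | backend/engine/calculator.py | calculate_room_count
-- ===== SOURCE A (Python) =====
-- def calculate_room_count(rooms: dict) -> dict:
--     """Aggregate room counts across all floors."""
--     totals = {
--         "bedrooms": 0,
--         "bathrooms": 0,
--         "kitchens": 0,
--         "halls": 0,
--         "optional": 0,
--     }
--     for floor_key, floor_data in rooms.items():
--         totals["bedrooms"] += floor_data.get("bedroom", 0)
--         totals["bathrooms"] += floor_data.get("bathroom", 0)
--         totals["kitchens"] += floor_data.get("kitchen", 0)
--         totals["halls"] += floor_data.get("hall", 0)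
--         totals["optional"] += floor_data.get("optional", 0)
--     return totals
-- ===== SOURCE B (Python) =====
-- def calculate_room_count(rooms: dict) -> dict:
--     """Aggregate room counts across all floors (transposed: one aggregation per room type)."""
--     key_map = {
--         "bedrooms": "bedroom",
--         "bathrooms": "bathroom",
--         "kitchens": "kitchen",
--         "halls": "hall",
--         "optional": "optional",
--     }
--     return {
--         out_key: sum(floor_data.get(src, 0) for floor_data in rooms.values())
--         for out_key, src in key_map.items()
--     }
-- ===== Notes on version B (the rewrite author's own statement) =====
-- stated objective: idiomatic
-- what changed: Transposed the aggregation: instead of one pass over floors updating five mutable accumulators in a dict, B builds the result with a dict comprehension over a key map, computing one sum per room type over all floors.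
import Mathlib
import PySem

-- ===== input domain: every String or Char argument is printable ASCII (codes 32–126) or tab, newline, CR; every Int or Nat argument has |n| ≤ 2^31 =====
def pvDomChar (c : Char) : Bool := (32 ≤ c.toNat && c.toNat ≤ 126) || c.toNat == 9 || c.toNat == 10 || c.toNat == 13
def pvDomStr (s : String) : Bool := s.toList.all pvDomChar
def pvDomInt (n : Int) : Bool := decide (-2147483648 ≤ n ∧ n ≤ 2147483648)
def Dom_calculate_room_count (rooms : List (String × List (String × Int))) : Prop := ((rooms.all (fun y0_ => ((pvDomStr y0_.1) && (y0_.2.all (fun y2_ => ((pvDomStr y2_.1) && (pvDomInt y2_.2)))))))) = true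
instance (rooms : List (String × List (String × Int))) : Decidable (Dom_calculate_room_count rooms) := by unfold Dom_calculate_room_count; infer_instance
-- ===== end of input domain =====

-- B transposes A's single accumulating pass into one sum per room type via a key map (idiomatic; same cost).

-- ===== PORT A =====
-- totals["k"] += floor_data.get(src, 0) : dict update, transliterated with PySem.Dict
def crcStepA (t : PySem.Dict String Int) (fd : String × List (String × Int)) : PySem.Dict String Int :=
  let f := PySem.Dict.mk fd.2
  let t := t.insert "bedrooms" (t.getD "bedrooms" 0 + f.getD "bedroom" 0)
  let t := t.insert "bathrooms" (t.getD "bathrooms" 0 + f.getD "bathroom" 0)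
  let t := t.insert "kitchens" (t.getD "kitchens" 0 + f.getD "kitchen" 0)
  let t := t.insert "halls" (t.getD "halls" 0 + f.getD "hall" 0)
  t.insert "optional" (t.getD "optional" 0 + f.getD "optional" 0)

def calculate_room_count (rooms : List (String × List (String × Int))) : List (String × Int) :=
  let totals : PySem.Dict String Int :=
    PySem.Dict.mk [("bedrooms", 0), ("bathrooms", 0), ("kitchens", 0), ("halls", 0), ("optional", 0)]
  (rooms.foldl crcStepA totals).items

-- ===== PORT B =====
def crcKeyMap : List (String × String) :=
  [("bedrooms", "bedroom"), ("bathrooms", "bathroom"), ("kitchens", "kitchen"),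
   ("halls", "hall"), ("optional", "optional")]

def calculate_room_count_alt (rooms : List (String × List (String × Int))) : List (String × Int) :=
  crcKeyMap.map (fun p =>
    (p.1, (rooms.map (fun fd => (PySem.Dict.mk fd.2).getD p.2 0)).sum))

-- ===== PRECONDITION & SPEC =====
def Spec_calculate_room_count (rooms : List (String × List (String × Int))) (out : List (String × Int)) : Prop := out = calculate_room_count_alt rooms
instance (rooms : List (String × List (String × Int))) (out : List (String × Int)) : Decidable (Spec_calculate_room_count rooms out) := by unfold Spec_calculate_room_count; infer_instance

-- ===== CLAIM (what is proved, stated in full; the proofs are below) =====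
def Claim_equal_calculate_room_count : Prop := ∀ (rooms : List (String × List (String × Int))), Dom_calculate_room_count rooms → Spec_calculate_room_count rooms (calculate_room_count rooms)

-- ===== LEMMAS AND PROOFS =====

-- value pulled from a floor for one room type
def crcGet (fd : String × List (String × Int)) (src : String) : Int :=
  (PySem.Dict.mk fd.2).getD src 0

lemma crcStepA_mk (fd : String × List (String × Int)) (b1 b2 b3 b4 b5 : Int) :
    crcStepA (PySem.Dict.mk [("bedrooms", b1), ("bathrooms", b2), ("kitchens", b3), ("halls", b4), ("optional", b5)]) fd
    = PySem.Dict.mk [("bedrooms", b1 + crcGet fd "bedroom"), ("bathrooms", b2 + crcGet fd "bathroom"),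
        ("kitchens", b3 + crcGet fd "kitchen"), ("halls", b4 + crcGet fd "hall"),
        ("optional", b5 + crcGet fd "optional")] := by
  simp [crcStepA, crcGet, PySem.Dict.insert, PySem.Dict.getD, PySem.Dict.get?,
    PySem.Dict.contains]

lemma crc_foldl (rooms : List (String × List (String × Int))) (b1 b2 b3 b4 b5 : Int) :
    rooms.foldl crcStepA
      (PySem.Dict.mk [("bedrooms", b1), ("bathrooms", b2), ("kitchens", b3), ("halls", b4), ("optional", b5)])
    = PySem.Dict.mk
        [("bedrooms", b1 + (rooms.map (fun fd => crcGet fd "bedroom")).sum),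
         ("bathrooms", b2 + (rooms.map (fun fd => crcGet fd "bathroom")).sum),
         ("kitchens", b3 + (rooms.map (fun fd => crcGet fd "kitchen")).sum),
         ("halls", b4 + (rooms.map (fun fd => crcGet fd "hall")).sum),
         ("optional", b5 + (rooms.map (fun fd => crcGet fd "optional")).sum)] := by
  induction rooms generalizing b1 b2 b3 b4 b5 with
  | nil => simp
  | cons fd rest ih =>
      simp only [List.foldl_cons, crcStepA_mk, ih, List.map_cons, List.sum_cons]
      ring_nf

-- ===== VERDICT (by name: the statement is the Claim_ definition above) =====
theorem calculate_room_count_spec : Claim_equal_calculate_room_count := by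
  intro rooms _
  show _ = _
  simp [calculate_room_count, crc_foldl, calculate_room_count_alt, crcKeyMap, crcGet]
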